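-- pv_equiv track=rewrite | github.com/runtimeverification/mir-semantics | scripts/apply-external-suite-results.py | update_suite
-- ===== SOURCE A (Python) =====
-- def update_suite(sections: dict[str, dict], suite: str, statuses: dict[str, str]) -> dict[str, int]:
--     passed = {rel for rel, outcome in statuses.items() if outcome == 'passed'}
--     non_pass = set(statuses) - passed
--
--     stats = {
--         'passed': len(passed),
--         'non_pass': len(non_pass),
--         'moved_to_tests': 0,
--         'moved_to_skip': 0,
--         'removed_from_tests': 0,
--         'removed_from_skip': 0,
--     }
--
--     for entry in sections.values():
--         tests_bucket = entry.setdefault('tests', {})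
--         skip_bucket = entry.setdefault('skip', {})
--
--         tests = set(tests_bucket.get(suite, []))
--         skip = set(skip_bucket.get(suite, []))
--         combined = tests | skip
--         if not combined:
--             continue
--
--         newly_to_tests = (combined & passed) - tests
--         newly_to_skip = (combined & non_pass) - skip
--         stats['moved_to_tests'] += len(newly_to_tests)
--         stats['moved_to_skip'] += len(newly_to_skip)
--         stats['removed_from_tests'] += len(tests & non_pass)
--         stats['removed_from_skip'] += len(skip & passed)
--
--         new_tests = sorted((tests | (combined & passed)) - non_pass)
--         new_skip = sorted((skip | (combined & non_pass)) - passed)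
--
--         if new_tests:
--             tests_bucket[suite] = new_tests
--         elif suite in tests_bucket:
--             del tests_bucket[suite]
--
--         if new_skip:
--             skip_bucket[suite] = new_skip
--         elif suite in skip_bucket:
--             del skip_bucket[suite]
--
--         if not tests_bucket:
--             entry.pop('tests', None)
--         if not skip_bucket:
--             entry.pop('skip', None)
--
--     return stats
-- ===== SOURCE B (Python) =====
-- def update_suite(sections: dict[str, dict], suite: str, statuses: dict[str, str]) -> dict[str, int]:
--     passed = {rel for rel, outcome in statuses.items() if outcome == 'passed'}
--     non_pass = set(statuses) - passed
--
--     moved_to_tests = moved_to_skip = removed_from_tests = removed_from_skip = 0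
--
--     for entry in sections.values():
--         tests_bucket = entry.setdefault('tests', {})
--         skip_bucket = entry.setdefault('skip', {})
--
--         tests = tests_bucket.get(suite, [])
--         skip = skip_bucket.get(suite, [])
--         if not tests and not skip:
--             continue
--
--         new_tests: list = []
--         new_skip: list = []
--         # one pass over the deduplicated combined membership decides each
--         # entry's destination and maintains the counters inline
--         for rel in dict.fromkeys(tests + skip):
--             if rel in passed:
--                 new_tests.append(rel)
--                 if rel not in tests:
--                     moved_to_tests += 1
--                 if rel in skip:
--                     removed_from_skip += 1
--             elif rel in non_pass:
--                 new_skip.append(rel)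
--                 if rel not in skip:
--                     moved_to_skip += 1
--                 if rel in tests:
--                     removed_from_tests += 1
--             else:
--                 # status unknown: the entry stays wherever it currently is
--                 if rel in tests:
--                     new_tests.append(rel)
--                 if rel in skip:
--                     new_skip.append(rel)
--
--         new_tests.sort()
--         new_skip.sort()
--
--         if new_tests:
--             tests_bucket[suite] = new_tests
--         elif suite in tests_bucket:
--             del tests_bucket[suite]
--
--         if new_skip:
--             skip_bucket[suite] = new_skip
--         elif suite in skip_bucket:
--             del skip_bucket[suite]
--
--         if not tests_bucket:
--             entry.pop('tests', None)
--         if not skip_bucket: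
--             entry.pop('skip', None)
--
--     return {
--         'passed': len(passed),
--         'non_pass': len(non_pass),
--         'moved_to_tests': moved_to_tests,
--         'moved_to_skip': moved_to_skip,
--         'removed_from_tests': removed_from_tests,
--         'removed_from_skip': removed_from_skip,
--     }
-- ===== Notes on version B (the rewrite author's own statement) =====
-- stated objective: alternative
-- what changed: The per-section block of six set intersections/differences is replaced by a single pass over the deduplicated union of the two bucket lists that classifies each entry (passed / non-pass / unknown) and bumps the four move/remove counters inline by membership checks.
import Mathlib
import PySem

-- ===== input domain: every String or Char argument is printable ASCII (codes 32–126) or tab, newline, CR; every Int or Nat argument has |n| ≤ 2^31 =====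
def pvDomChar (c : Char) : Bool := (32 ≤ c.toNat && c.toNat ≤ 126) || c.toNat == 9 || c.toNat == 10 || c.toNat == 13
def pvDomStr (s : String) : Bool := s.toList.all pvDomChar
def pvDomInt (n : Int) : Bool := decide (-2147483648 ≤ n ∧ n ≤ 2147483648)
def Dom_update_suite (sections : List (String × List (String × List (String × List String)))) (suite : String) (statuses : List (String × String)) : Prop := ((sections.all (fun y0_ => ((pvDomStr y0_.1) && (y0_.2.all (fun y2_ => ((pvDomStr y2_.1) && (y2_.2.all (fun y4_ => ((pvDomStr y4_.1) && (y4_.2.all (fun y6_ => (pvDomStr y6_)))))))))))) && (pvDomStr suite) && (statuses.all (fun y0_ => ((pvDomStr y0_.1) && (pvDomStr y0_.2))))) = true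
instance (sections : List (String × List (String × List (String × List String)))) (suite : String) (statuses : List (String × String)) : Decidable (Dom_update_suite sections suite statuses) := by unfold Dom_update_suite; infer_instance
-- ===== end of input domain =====

-- B replaces A's per-section block of set intersections/differences by a single pass over the
-- deduplicated combined bucket that classifies each entry and bumps the counters inline (objective:
-- alternative decomposition, not measured faster). A mutates `sections` in place (B's Python performs
-- the identical mutation); the equivalence proved here is about the RETURN value (the stats dict)
-- only, so neither port materialises the mutated `sections`.

-- ===== PORT A =====
-- the body of A's `for entry in sections.values()` loop, acting on the stats dict
def aEntry (suite : String) (passed non_pass : PySem.Set String)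
    (stats : PySem.Dict String Int) (entry : List (String × List (String × List String))) :
    PySem.Dict String Int :=
  let entryd := PySem.Dict.ofList entry
  -- setdefault only mutates `entry`; the value read is .get with default {}
  let tests_bucket := PySem.Dict.ofList (entryd.getD "tests" [])
  let skip_bucket  := PySem.Dict.ofList (entryd.getD "skip" [])
  let tests : PySem.Set String := PySem.Set.ofList (tests_bucket.getD suite [])
  let skip  : PySem.Set String := PySem.Set.ofList (skip_bucket.getD suite [])
  let combined := PySem.Set.union tests skip
  if combined.isEmpty then stats
  else
    let newly_to_tests := PySem.Set.diff (PySem.Set.inter combined passed) tests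
    let newly_to_skip  := PySem.Set.diff (PySem.Set.inter combined non_pass) skip
    let stats := stats.modify "moved_to_tests" 0 (· + (newly_to_tests.length : Int))
    let stats := stats.modify "moved_to_skip" 0 (· + (newly_to_skip.length : Int))
    let stats := stats.modify "removed_from_tests" 0 (· + ((PySem.Set.inter tests non_pass).length : Int))
    let stats := stats.modify "removed_from_skip" 0 (· + ((PySem.Set.inter skip passed).length : Int))
    -- new_tests / new_skip and the bucket re-assignments mutate `sections` only; the
    -- returned stats dict is unaffected, so they are not materialised here
    stats

def update_suite (sections : List (String × List (String × List (String × List String)))) (suite : String) (statuses : List (String × String)) : List (String × Int) :=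
  let sdict := PySem.Dict.ofList statuses
  -- passed = {rel for rel, outcome in statuses.items() if outcome == 'passed'}
  let passed : PySem.Set String :=
    sdict.items.foldl (fun s p => if p.2 == "passed" then PySem.Set.add s p.1 else s) PySem.Set.empty
  -- non_pass = set(statuses) - passed
  let non_pass : PySem.Set String := PySem.Set.diff (PySem.Set.ofList sdict.keys) passed
  let stats : PySem.Dict String Int := PySem.Dict.ofList
    [("passed", (passed.length : Int)), ("non_pass", (non_pass.length : Int)),
     ("moved_to_tests", 0), ("moved_to_skip", 0), ("removed_from_tests", 0), ("removed_from_skip", 0)]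
  let stats := (PySem.Dict.ofList sections).values.foldl (aEntry suite passed non_pass) stats
  stats.items

-- ===== PORT B =====
-- the body of B's inner `for rel in dict.fromkeys(tests + skip)` loop on the four counters
def bRel (passed non_pass : PySem.Set String) (tests skip : List String)
    (st : Int × Int × Int × Int) (rel : String) : Int × Int × Int × Int :=
  let (mt, ms, rt, rs) := st
  if passed.contains rel then
    (mt + (if rel ∈ tests then 0 else 1), ms, rt, rs + (if rel ∈ skip then 1 else 0))
  else if non_pass.contains rel then
    (mt, ms + (if rel ∈ skip then 0 else 1), rt + (if rel ∈ tests then 1 else 0), rs)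
  else st

-- the body of B's `for entry in sections.values()` loop
def bEntry (suite : String) (passed non_pass : PySem.Set String)
    (st : Int × Int × Int × Int) (entry : List (String × List (String × List String))) :
    Int × Int × Int × Int :=
  let tests := (PySem.Dict.ofList ((PySem.Dict.ofList entry).getD "tests" [])).getD suite []
  let skip  := (PySem.Dict.ofList ((PySem.Dict.ofList entry).getD "skip" [])).getD suite []
  if tests.isEmpty && skip.isEmpty then st
  else (PySem.List.dedup (tests ++ skip)).foldl (bRel passed non_pass tests skip) st

def update_suite_alt (sections : List (String × List (String × List (String × List String)))) (suite : String) (statuses : List (String × String)) : List (String × Int) :=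
  let sdict := PySem.Dict.ofList statuses
  let passed : PySem.Set String :=
    sdict.items.foldl (fun s p => if p.2 == "passed" then PySem.Set.add s p.1 else s) PySem.Set.empty
  let non_pass : PySem.Set String := PySem.Set.diff (PySem.Set.ofList sdict.keys) passed
  let st := (PySem.Dict.ofList sections).values.foldl (bEntry suite passed non_pass) (0, 0, 0, 0)
  [("passed", (passed.length : Int)), ("non_pass", (non_pass.length : Int)),
   ("moved_to_tests", st.1), ("moved_to_skip", st.2.1),
   ("removed_from_tests", st.2.2.1), ("removed_from_skip", st.2.2.2)]

-- ===== PRECONDITION & SPEC =====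
def Spec_update_suite (sections : List (String × List (String × List (String × List String)))) (suite : String) (statuses : List (String × String)) (out : List (String × Int)) : Prop := out = update_suite_alt sections suite statuses
instance (sections : List (String × List (String × List (String × List String)))) (suite : String) (statuses : List (String × String)) (out : List (String × Int)) : Decidable (Spec_update_suite sections suite statuses out) := by unfold Spec_update_suite; infer_instance

-- ===== CLAIM (what is proved, stated in full; the proofs are below) =====
def Claim_equal_update_suite : Prop := ∀ (sections : List (String × List (String × List (String × List String)))) (suite : String) (statuses : List (String × String)), Dom_update_suite sections suite statuses → Spec_update_suite sections suite statuses (update_suite sections suite statuses)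

-- ===== LEMMAS AND PROOFS =====

-- the stats dict with the six fixed keys
def mkStats (p np mt ms rt rs : Int) : PySem.Dict String Int :=
  PySem.Dict.ofList
    [("passed", p), ("non_pass", np), ("moved_to_tests", mt), ("moved_to_skip", ms),
     ("removed_from_tests", rt), ("removed_from_skip", rs)]

def mk4 (p np : Int) (t : Int × Int × Int × Int) : PySem.Dict String Int :=
  mkStats p np t.1 t.2.1 t.2.2.1 t.2.2.2

-- the four per-rel predicates the counters count
def q1 (p tests : List String) (x : String) : Bool := p.contains x && !(tests.contains x)
def q2 (np sk : List String) (x : String) : Bool := np.contains x && !(sk.contains x)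
def q3 (np tests : List String) (x : String) : Bool := np.contains x && tests.contains x
def q4 (p sk : List String) (x : String) : Bool := p.contains x && sk.contains x

-- B's inner fold computes the four counts
theorem union_ofList (a b : List String) :
    PySem.Set.union (PySem.Set.ofList a) (PySem.Set.ofList b) = PySem.Set.ofList (a ++ b) := by
  rw [PySem.Set.ofList_append]
  show PySem.Set.update _ _ = _
  rw [PySem.Set.update_eq_append_filter, PySem.Set.update_eq_append_filter, PySem.Set.ofList_ofList]

theorem ofList_eq_nil_iff (l : List String) : PySem.Set.ofList l = [] ↔ l = [] := by
  constructor
  · intro h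
    rcases l with _ | ⟨x, l⟩
    · rfl
    · exfalso
      have : x ∈ PySem.Set.ofList (x :: l) := (PySem.Set.mem_ofList _ _).mpr (List.mem_cons_self)
      simp [h] at this
  · intro h; subst h; rfl

-- two Nodup lists filtered to the same member set have equal counts
theorem countP_nodup_eq (L M : List String) (f g : String → Bool) (hL : L.Nodup) (hM : M.Nodup)
    (h : ∀ x, (x ∈ L ∧ f x = true) ↔ (x ∈ M ∧ g x = true)) : L.countP f = M.countP g := by
  rw [List.countP_eq_length_filter, List.countP_eq_length_filter]
  refine List.Perm.length_eq ?_
  rw [List.perm_ext_iff_of_nodup (hL.filter f) (hM.filter g)]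
  intro x
  simp only [List.mem_filter]
  exact h x

theorem bRel_fold (p np tests sk : PySem.Set String) (hd : ∀ x, x ∈ np → x ∉ p) :
    ∀ (L : List String) (st : Int × Int × Int × Int),
      L.foldl (bRel p np tests sk) st =
        (st.1 + L.countP (q1 p tests), st.2.1 + L.countP (q2 np sk),
         st.2.2.1 + L.countP (q3 np tests), st.2.2.2 + L.countP (q4 p sk)) := by
  intro L
  induction L with
  | nil => intro st; simp
  | cons x L ih =>
    intro st
    obtain ⟨mt, ms, rt, rs⟩ := st
    rw [List.foldl_cons, ih]
    have hnp : x ∈ np → x ∉ p := hd x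
    by_cases h1 : x ∈ p <;> by_cases h2 : x ∈ np <;> by_cases h3 : x ∈ tests <;> by_cases h4 : x ∈ sk <;>
      simp_all [bRel, q1, q2, q3, q4, List.contains_eq_mem] <;> omega

-- each of A's four set-algebra counts equals the corresponding countP over the combined dedup
-- A's four modifies on the six-key stats dict just bump the four counter slots
theorem mkStats_eq (p np mt ms rt rs : Int) : mkStats p np mt ms rt rs =
    PySem.Dict.mk [("passed", p), ("non_pass", np), ("moved_to_tests", mt), ("moved_to_skip", ms),
      ("removed_from_tests", rt), ("removed_from_skip", rs)] := rfl

theorem m1 (p np mt ms rt rs a : Int) :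
    (PySem.Dict.mk [("passed", p), ("non_pass", np), ("moved_to_tests", mt), ("moved_to_skip", ms),
      ("removed_from_tests", rt), ("removed_from_skip", rs)]).modify "moved_to_tests" 0 (· + a) =
    PySem.Dict.mk [("passed", p), ("non_pass", np), ("moved_to_tests", mt + a), ("moved_to_skip", ms),
      ("removed_from_tests", rt), ("removed_from_skip", rs)] := rfl

theorem m2 (p np mt ms rt rs a : Int) :
    (PySem.Dict.mk [("passed", p), ("non_pass", np), ("moved_to_tests", mt), ("moved_to_skip", ms),
      ("removed_from_tests", rt), ("removed_from_skip", rs)]).modify "moved_to_skip" 0 (· + a) =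
    PySem.Dict.mk [("passed", p), ("non_pass", np), ("moved_to_tests", mt), ("moved_to_skip", ms + a),
      ("removed_from_tests", rt), ("removed_from_skip", rs)] := rfl

theorem m3 (p np mt ms rt rs a : Int) :
    (PySem.Dict.mk [("passed", p), ("non_pass", np), ("moved_to_tests", mt), ("moved_to_skip", ms),
      ("removed_from_tests", rt), ("removed_from_skip", rs)]).modify "removed_from_tests" 0 (· + a) =
    PySem.Dict.mk [("passed", p), ("non_pass", np), ("moved_to_tests", mt), ("moved_to_skip", ms),
      ("removed_from_tests", rt + a), ("removed_from_skip", rs)] := rfl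

theorem m4 (p np mt ms rt rs a : Int) :
    (PySem.Dict.mk [("passed", p), ("non_pass", np), ("moved_to_tests", mt), ("moved_to_skip", ms),
      ("removed_from_tests", rt), ("removed_from_skip", rs)]).modify "removed_from_skip" 0 (· + a) =
    PySem.Dict.mk [("passed", p), ("non_pass", np), ("moved_to_tests", mt), ("moved_to_skip", ms),
      ("removed_from_tests", rt), ("removed_from_skip", rs + a)] := rfl

theorem modify_chain (P NP mt ms rt rs a b c d : Int) :
    ((((mkStats P NP mt ms rt rs).modify "moved_to_tests" 0 (· + a)).modify "moved_to_skip" 0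
        (· + b)).modify "removed_from_tests" 0 (· + c)).modify "removed_from_skip" 0 (· + d) =
      mkStats P NP (mt + a) (ms + b) (rt + c) (rs + d) := by
  rw [mkStats_eq, m1, m2, m3, m4, ← mkStats_eq]

theorem aEntry_eq (suite : String) (p np : PySem.Set String) (hd : ∀ x, x ∈ np → x ∉ p)
    (P NP : Int) (st : Int × Int × Int × Int) (e : List (String × List (String × List String))) :
    aEntry suite p np (mk4 P NP st) e = mk4 P NP (bEntry suite p np st e) := by
  simp only [aEntry, bEntry]
  generalize (PySem.Dict.ofList ((PySem.Dict.ofList e).getD "tests" [])).getD suite [] = tests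
  generalize (PySem.Dict.ofList ((PySem.Dict.ofList e).getD "skip" [])).getD suite [] = sk
  rw [union_ofList]
  by_cases hc : tests ++ sk = []
  · obtain ⟨h1, h2⟩ := List.append_eq_nil_iff.mp hc
    subst h1; subst h2
    rfl
  · have hne : ¬((PySem.Set.ofList (tests ++ sk)).isEmpty = true) := by
      simp only [List.isEmpty_iff, ofList_eq_nil_iff]
      exact hc
    have hne2 : ¬((tests.isEmpty && sk.isEmpty) = true) := by
      simp only [Bool.and_eq_true, List.isEmpty_iff]
      intro ⟨h1, h2⟩
      exact hc (by rw [h1, h2]; rfl)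
    rw [if_neg hne, if_neg hne2, bRel_fold p np tests sk hd]
    have h1 : ((PySem.Set.diff (PySem.Set.inter (PySem.Set.ofList (tests ++ sk)) p)
          (PySem.Set.ofList tests)).length : Int)
        = ((PySem.List.dedup (tests ++ sk)).countP (q1 p tests) : Int) := by
      show ((List.filter _ (List.filter _ _)).length : Int) = _
      rw [List.filter_filter, ← List.countP_eq_length_filter]
      congr 1
      apply countP_nodup_eq _ _ _ _ (PySem.Set.nodup_ofList _) (PySem.Set.nodup_ofList _)
      intro x
      simp [q1, PySem.Set.mem_ofList, PySem.Set.contains_eq_listContains, List.contains_eq_mem]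
      tauto
    have h2 : ((PySem.Set.diff (PySem.Set.inter (PySem.Set.ofList (tests ++ sk)) np)
          (PySem.Set.ofList sk)).length : Int)
        = ((PySem.List.dedup (tests ++ sk)).countP (q2 np sk) : Int) := by
      show ((List.filter _ (List.filter _ _)).length : Int) = _
      rw [List.filter_filter, ← List.countP_eq_length_filter]
      congr 1
      apply countP_nodup_eq _ _ _ _ (PySem.Set.nodup_ofList _) (PySem.Set.nodup_ofList _)
      intro x
      simp [q2, PySem.Set.mem_ofList, PySem.Set.contains_eq_listContains, List.contains_eq_mem]
      tauto
    have h3 : ((PySem.Set.inter (PySem.Set.ofList tests) np).length : Int)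
        = ((PySem.List.dedup (tests ++ sk)).countP (q3 np tests) : Int) := by
      show ((List.filter _ _).length : Int) = _
      rw [← List.countP_eq_length_filter]
      congr 1
      apply countP_nodup_eq _ _ _ _ (PySem.Set.nodup_ofList _) (PySem.Set.nodup_ofList _)
      intro x
      simp [q3, PySem.Set.mem_ofList, PySem.Set.contains_eq_listContains, List.contains_eq_mem]
      tauto
    have h4 : ((PySem.Set.inter (PySem.Set.ofList sk) p).length : Int)
        = ((PySem.List.dedup (tests ++ sk)).countP (q4 p sk) : Int) := by
      show ((List.filter _ _).length : Int) = _
      rw [← List.countP_eq_length_filter]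
      congr 1
      apply countP_nodup_eq _ _ _ _ (PySem.Set.nodup_ofList _) (PySem.Set.nodup_ofList _)
      intro x
      simp [q4, PySem.Set.mem_ofList, PySem.Set.contains_eq_listContains, List.contains_eq_mem]
      tauto
    show ((((mkStats P NP st.1 st.2.1 st.2.2.1 st.2.2.2).modify "moved_to_tests" 0 _).modify
        "moved_to_skip" 0 _).modify "removed_from_tests" 0 _).modify "removed_from_skip" 0 _ = _
    rw [modify_chain, h1, h2, h3, h4]
    rfl

theorem fold_eq (suite : String) (p np : PySem.Set String) (hd : ∀ x, x ∈ np → x ∉ p)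
    (P NP : Int) :
    ∀ (vals : List (List (String × List (String × List String)))) (st : Int × Int × Int × Int),
      vals.foldl (aEntry suite p np) (mk4 P NP st) = mk4 P NP (vals.foldl (bEntry suite p np) st) := by
  intro vals
  induction vals with
  | nil => intro st; rfl
  | cons e vals ih => intro st; simp only [List.foldl_cons, aEntry_eq suite p np hd P NP st e, ih]

theorem stats0_eq (P NP : Int) :
    (PySem.Dict.ofList
      [("passed", P), ("non_pass", NP), ("moved_to_tests", 0), ("moved_to_skip", 0),
       ("removed_from_tests", 0), ("removed_from_skip", 0)] : PySem.Dict String Int) =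
      mk4 P NP (0, 0, 0, 0) := rfl

theorem items_mk4 (P NP : Int) (t : Int × Int × Int × Int) :
    (mk4 P NP t).items =
      [("passed", P), ("non_pass", NP), ("moved_to_tests", t.1), ("moved_to_skip", t.2.1),
       ("removed_from_tests", t.2.2.1), ("removed_from_skip", t.2.2.2)] := rfl

-- ===== VERDICT (by name: the statement is the Claim_ definition above) =====
theorem update_suite_spec : Claim_equal_update_suite := by
  intro sections suite statuses _
  unfold Spec_update_suite
  have hd : ∀ x, x ∈ PySem.Set.diff (PySem.Set.ofList (PySem.Dict.ofList statuses).keys)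
      ((PySem.Dict.ofList statuses).items.foldl
        (fun s p => if p.2 == "passed" then PySem.Set.add s p.1 else s) PySem.Set.empty) →
      x ∉ (PySem.Dict.ofList statuses).items.foldl
        (fun s p => if p.2 == "passed" then PySem.Set.add s p.1 else s) PySem.Set.empty := by
    intro x hx
    exact ((PySem.Set.mem_diff _ _ _).mp hx).2
  simp only [update_suite, update_suite_alt]
  rw [stats0_eq, fold_eq suite _ _ hd, items_mk4]
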